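-- pv_equiv track=rewrite | github.com/aya-baur/Poetry-Analyzer | poetry_functions.py | check_rhymes
-- ===== SOURCE A (Python) =====
-- from typing import List
--
-- def check_rhymes(scheme: List[str]) -> List[str]:
--     ''' Check if there are rhymes in scheme, if no replace letters with *
--
--
--     >>> check_rhymes(['A', 'B', 'C'])
--     ['*', '*', '*']
--     '''
--     num = 0
--     for lst in scheme:
--         num += scheme.count(lst)
--     for i in range(num):
--         if num == len(scheme):
--             scheme[i] = '*'
--
--     return scheme
-- ===== SOURCE B (Python) =====
-- def check_rhymes(scheme):
--     ''' Check if there are rhymes in scheme, if no replace letters with * '''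
--     s = sorted(scheme)
--     if any(s[i] == s[i + 1] for i in range(len(s) - 1)):
--         return scheme
--     scheme[:] = ['*'] * len(scheme)
--     return scheme
-- ===== Notes on version B (the rewrite author's own statement) =====
-- stated objective: faster
-- what changed: Replaces A's quadratic sum-of-counts duplicate test with sort-then-adjacent-scan; when all entries are unique the list is overwritten with '*' in one slice assignment.
import Mathlib
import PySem

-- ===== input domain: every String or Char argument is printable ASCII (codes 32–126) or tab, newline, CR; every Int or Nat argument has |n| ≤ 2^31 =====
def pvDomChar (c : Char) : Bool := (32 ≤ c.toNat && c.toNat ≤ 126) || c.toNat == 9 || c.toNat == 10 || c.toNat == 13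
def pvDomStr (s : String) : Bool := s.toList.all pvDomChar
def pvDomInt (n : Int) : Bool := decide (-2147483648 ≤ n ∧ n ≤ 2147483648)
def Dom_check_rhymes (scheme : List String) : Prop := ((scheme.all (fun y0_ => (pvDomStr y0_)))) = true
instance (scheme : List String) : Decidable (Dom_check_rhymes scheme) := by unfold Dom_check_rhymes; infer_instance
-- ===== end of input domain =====

-- B replaces A's quadratic sum-of-counts duplicate test by sort-then-adjacent-scan (faster);
-- both Pythons mutate `scheme` in place identically (all entries set to '*' iff all unique),
-- and the equivalence proved here is about the return value.

-- ===== PORT A =====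
-- A's first loop: num += scheme.count(lst) over scheme
def check_rhymes_num (scheme : List String) : Int :=
  scheme.foldl (fun n lst => n + (scheme.count lst : Int)) 0

def check_rhymes (scheme : List String) : List String :=
  (PySem.List.pyRange 0 (check_rhymes_num scheme) 1).foldl
    (fun l i => if check_rhymes_num scheme == (l.length : Int) then l.set i.toNat "*" else l)
    scheme

-- ===== PORT B =====
-- s = sorted(scheme)
def check_rhymes_alt_sorted (scheme : List String) : List String :=
  PySem.List.sorted scheme (fun x => x) false

def check_rhymes_alt (scheme : List String) : List String :=
  if (PySem.List.pyRange 0 (((check_rhymes_alt_sorted scheme).length : Int) - 1) 1).any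
      (fun i => PySem.List.pyGetD (check_rhymes_alt_sorted scheme) i ""
        == PySem.List.pyGetD (check_rhymes_alt_sorted scheme) (i + 1) "") then
    scheme
  else
    List.replicate scheme.length "*"

-- ===== PRECONDITION & SPEC =====
def Spec_check_rhymes (scheme : List String) (out : List String) : Prop := out = check_rhymes_alt scheme
instance (scheme : List String) (out : List String) : Decidable (Spec_check_rhymes scheme out) := by unfold Spec_check_rhymes; infer_instance

-- ===== CLAIM (what is proved, stated in full; the proofs are below) =====
def Claim_equal_check_rhymes : Prop := ∀ (scheme : List String), Dom_check_rhymes scheme → Spec_check_rhymes scheme (check_rhymes scheme)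

-- ===== LEMMAS AND PROOFS =====

-- A's first loop computes the sum of counts of every element.
theorem pv_num_eq (scheme : List String) :
    check_rhymes_num scheme = ((scheme.map (fun x => scheme.count x)).sum : Nat) := by
  unfold check_rhymes_num
  have h : ∀ (t : List String) (init : Int),
      t.foldl (fun n lst => n + (scheme.count lst : Int)) init
        = init + ((t.map (fun x => scheme.count x)).sum : Nat) := by
    intro t
    induction t with
    | nil => simp
    | cons a t ih => intro init; simp [List.foldl_cons, ih]; ring
  simpa using h scheme 0

-- the sum of self-counts equals the length iff the list has no duplicates
theorem pv_sum_counts_eq_iff (l : List String) :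
    (l.map (fun x => l.count x)).sum = l.length ↔ l.Nodup := by
  constructor
  · intro h
    by_contra hnd
    rw [List.nodup_iff_count_le_one] at hnd
    push Not at hnd
    obtain ⟨a, ha⟩ := hnd
    have hmem : a ∈ l := by
      by_contra hm
      simp [List.count_eq_zero_of_not_mem hm] at ha
    have hlt : (l.map (fun _ => 1)).sum < (l.map (fun x => l.count x)).sum := by
      refine List.sum_lt_sum _ _ (fun i hi => List.count_pos_iff.mpr hi) ⟨a, hmem, ?_⟩
      omega
    simp at hlt
    omega
  · intro h
    calc (l.map (fun x => l.count x)).sum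
        = (l.map (fun _ => 1)).sum :=
          congrArg List.sum (List.map_congr_left (fun x hx => List.count_eq_one_of_mem h hx))
      _ = l.length := by simp

-- A's second loop is the identity when the guard is false
theorem pv_foldl_guard_false (num : Int) (r : List Int) (l : List String)
    (h : (num == (l.length : Int)) = false) :
    r.foldl (fun l i => if num == (l.length : Int) then l.set i.toNat "*" else l) l = l := by
  induction r with
  | nil => rfl
  | cons a r ih =>
    rw [List.foldl_cons, if_neg (by simp [h]), ih]

-- A's second loop overwrites the first n positions with "*" when the guard always holds
theorem pv_foldl_set (N : Nat) (n : Nat) (l : List String) (hl : l.length = N) (hn : n ≤ N) :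
    (List.range n).foldl
        (fun l k => if (N : Int) == (l.length : Int) then l.set k "*" else l) l
      = List.replicate n "*" ++ l.drop n := by
  induction n with
  | zero => simp
  | succ n ih =>
    rw [List.range_succ, List.foldl_append, ih (by omega)]
    have hlen : (List.replicate n "*" ++ l.drop n).length = N := by
      simp; omega
    have hguard : ((N : Int) == ((List.replicate n "*" ++ l.drop n).length : Int)) = true := by
      simp [hlen]
    simp only [List.foldl_cons, List.foldl_nil, hguard, if_pos]
    rw [List.set_append]
    simp only [List.length_replicate, lt_irrefl, Nat.sub_self]
    rw [List.drop_eq_getElem_cons (by omega : n < l.length), List.set_cons_zero]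
    simp [List.replicate_succ' (n := n)]

-- a ≤-sorted list that is not nodup has two equal adjacent entries
theorem pv_adjacent_dup (s : List String) (hp : s.Pairwise (· ≤ ·)) (hnd : ¬ s.Nodup) :
    ∃ i : Nat, ∃ h : i + 1 < s.length, s[i] = s[i + 1] := by
  rw [List.nodup_iff_getElem?_ne_getElem?] at hnd
  push Not at hnd
  obtain ⟨i, j, hij, hj, heq⟩ := hnd
  have hi : i < s.length := by omega
  have heq' : s[i] = s[j] := by
    have h1 := s.getElem?_eq_getElem hi
    have h2 := s.getElem?_eq_getElem hj
    rw [h1, h2] at heq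
    exact Option.some_injective _ heq
  rw [List.pairwise_iff_getElem] at hp
  refine ⟨i, by omega, ?_⟩
  have h1 : s[i] ≤ s[i + 1] := hp i (i + 1) hi (by omega) (by omega)
  have h2 : s[i + 1] ≤ s[j] := by
    rcases Nat.lt_or_ge (i + 1) j with h | h
    · exact hp (i + 1) j (by omega) hj h
    · have : i + 1 = j := by omega
      simp [this]
  exact le_antisymm h1 (heq' ▸ h2)

-- a nodup list has no two equal adjacent entries
theorem pv_no_adjacent_dup (s : List String) (hnd : s.Nodup) (i : Nat) (h : i + 1 < s.length) :
    s[i] ≠ s[i + 1] := by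
  intro heq
  rw [List.nodup_iff_getElem?_ne_getElem?] at hnd
  have h1 := s.getElem?_eq_getElem (show i < s.length by omega)
  have h2 := s.getElem?_eq_getElem h
  exact hnd i (i + 1) (by omega) h (by rw [h1, h2, heq])

-- B's adjacent scan returns true exactly when the sorted list has two equal neighbours
theorem pv_any_adjacent (s : List String) :
    ((PySem.List.pyRange 0 ((s.length : Int) - 1) 1).any
        (fun i => PySem.List.pyGetD s i "" == PySem.List.pyGetD s (i + 1) "") = true)
      ↔ ∃ i : Nat, ∃ h : i + 1 < s.length, s[i] = s[i + 1] := by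
  rw [List.any_eq_true]
  constructor
  · rintro ⟨i, hmem, hbeq⟩
    rw [PySem.List.mem_pyRange_one] at hmem
    obtain ⟨h0, h1⟩ := hmem
    have hi1 : i.toNat + 1 < s.length := by omega
    refine ⟨i.toNat, hi1, ?_⟩
    rw [PySem.List.pyGetD_eq_getElem s "" h0 (by omega),
        PySem.List.pyGetD_eq_getElem s "" (by omega) (by omega)] at hbeq
    have : (i + 1).toNat = i.toNat + 1 := by omega
    simp only [this] at hbeq
    exact eq_of_beq hbeq
  · rintro ⟨i, h, heq⟩
    refine ⟨(i : Int), ?_, ?_⟩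
    · rw [PySem.List.mem_pyRange_one]; omega
    · rw [PySem.List.pyGetD_eq_getElem s "" (by omega) (by omega),
          PySem.List.pyGetD_eq_getElem s "" (by omega) (by omega)]
      have h2 : ((i : Int) + 1).toNat = i + 1 := by omega
      simp only [Int.toNat_natCast, h2, heq, beq_self_eq_true]

-- ===== VERDICT (by name: the statement is the Claim_ definition above) =====
theorem check_rhymes_spec : Claim_equal_check_rhymes := by
  intro scheme _
  unfold Spec_check_rhymes check_rhymes check_rhymes_alt
  have hperm := PySem.List.sorted_perm scheme (fun x : String => x) false
  have hpair : (check_rhymes_alt_sorted scheme).Pairwise (· ≤ ·) :=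
    PySem.List.sorted_pairwise scheme (fun x => x)
  rw [pv_num_eq]
  by_cases hnd : scheme.Nodup
  · -- all unique: A sets every entry to "*", B returns replicate
    have hsum : (scheme.map (fun x => scheme.count x)).sum = scheme.length :=
      (pv_sum_counts_eq_iff scheme).mpr hnd
    have hnds : (check_rhymes_alt_sorted scheme).Nodup := (hperm.nodup_iff).mpr hnd
    have hany : ((PySem.List.pyRange 0 (((check_rhymes_alt_sorted scheme).length : Int) - 1) 1).any
        (fun i => PySem.List.pyGetD (check_rhymes_alt_sorted scheme) i ""
          == PySem.List.pyGetD (check_rhymes_alt_sorted scheme) (i + 1) "")) = false := by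
      rw [Bool.eq_false_iff]
      intro h
      obtain ⟨i, hi, heq⟩ := (pv_any_adjacent _).mp h
      exact pv_no_adjacent_dup _ hnds i hi heq
    rw [hsum, hany, if_neg (by simp)]
    rw [PySem.List.pyRange_zero_nat, List.foldl_map]
    have := pv_foldl_set scheme.length scheme.length scheme rfl (le_refl _)
    simp only [Int.toNat_natCast] at this ⊢
    rw [this]
    simp
  · -- a duplicate exists: A's guard is always false, B's scan finds an adjacent pair
    have hsum : (scheme.map (fun x => scheme.count x)).sum ≠ scheme.length :=
      fun h => hnd ((pv_sum_counts_eq_iff scheme).mp h)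
    have hnds : ¬ (check_rhymes_alt_sorted scheme).Nodup :=
      fun h => hnd ((hperm.nodup_iff).mp h)
    have hany : ((PySem.List.pyRange 0 (((check_rhymes_alt_sorted scheme).length : Int) - 1) 1).any
        (fun i => PySem.List.pyGetD (check_rhymes_alt_sorted scheme) i ""
          == PySem.List.pyGetD (check_rhymes_alt_sorted scheme) (i + 1) "")) = true :=
      (pv_any_adjacent _).mpr (pv_adjacent_dup _ hpair hnds)
    rw [hany, if_pos (by simp)]
    exact pv_foldl_guard_false _ _ _ (by rw [beq_eq_false_iff_ne]; exact_mod_cast hsum)
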